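-- pv_equiv track=rewrite | github.com/wwang4768/https-github.com-wwang4768-2023fall_cis1_pa3 | PROGRAMS/dataParsing_library.py | parseOptpivot
-- ===== SOURCE A (Python) =====
-- def parseOptpivot(point_cloud, len_chunk_d, len_chunk_h):
--     frames_d = []
--     frames_h = []
--
--     chunk_size_d = len_chunk_d
--     chunk_size_h = len_chunk_h
--
--     current_list = 'D'
--     temp = []
--
--     for p in point_cloud:
--         temp.append(p)
--
--         if len(temp) == chunk_size_d and current_list == 'D':
--             frames_d.append(temp)
--             temp = []
--             current_list = 'H'
--         elif len(temp) == chunk_size_h and current_list == 'H':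
--             frames_h.append(temp)
--             temp = []
--             current_list = 'D'
--     return frames_d, frames_h
-- ===== SOURCE B (Python) =====
-- def parseOptpivot(point_cloud, len_chunk_d, len_chunk_h):
--     frames_d = []
--     frames_h = []
--     rest = list(point_cloud)
--     turn = True  # True -> next chunk goes to frames_d, False -> frames_h
--     while True:
--         size = len_chunk_d if turn else len_chunk_h
--         if size <= 0 or len(rest) < size:
--             break
--         (frames_d if turn else frames_h).append(rest[:size])
--         rest = rest[size:]
--         turn = not turn
--     return frames_d, frames_h
-- ===== Notes on version B (the rewrite author's own statement) =====
-- stated objective: simpler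
-- what changed: Replaced A's element-by-element buffered state machine (temp list + 'D'/'H' mode string) with a plain loop that slices whole chunks off the remaining list, alternating a boolean turn.
import Mathlib
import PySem

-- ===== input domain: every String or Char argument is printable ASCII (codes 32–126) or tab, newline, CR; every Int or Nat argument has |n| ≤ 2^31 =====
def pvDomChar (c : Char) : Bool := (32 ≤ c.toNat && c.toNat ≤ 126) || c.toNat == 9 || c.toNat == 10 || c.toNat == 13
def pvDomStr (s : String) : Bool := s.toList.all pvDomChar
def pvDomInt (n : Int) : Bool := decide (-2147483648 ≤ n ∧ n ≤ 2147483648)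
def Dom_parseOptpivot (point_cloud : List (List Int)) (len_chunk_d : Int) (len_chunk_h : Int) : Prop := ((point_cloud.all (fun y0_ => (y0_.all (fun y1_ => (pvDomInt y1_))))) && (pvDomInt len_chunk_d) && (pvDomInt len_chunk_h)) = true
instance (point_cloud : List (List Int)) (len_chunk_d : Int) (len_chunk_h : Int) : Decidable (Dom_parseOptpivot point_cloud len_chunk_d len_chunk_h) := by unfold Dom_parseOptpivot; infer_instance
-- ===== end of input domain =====

-- B replaces A's element-by-element buffered state machine with a loop slicing whole chunks off the remaining list (simpler decomposition, same O(n) cost).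

-- ===== PORT A =====
-- one iteration of A's for-loop; state = (frames_d, frames_h, current_list, temp)
def parseOptpivotStep (d h : Int)
    (s : List (List (List Int)) × List (List (List Int)) × String × List (List Int))
    (p : List Int) :
    List (List (List Int)) × List (List (List Int)) × String × List (List Int) :=
  let temp' := s.2.2.2 ++ [p]
  if ((temp'.length : Int) = d ∧ s.2.2.1 = "D") then
    (s.1 ++ [temp'], s.2.1, "H", [])
  else if ((temp'.length : Int) = h ∧ s.2.2.1 = "H") then
    (s.1, s.2.1 ++ [temp'], "D", [])
  else
    (s.1, s.2.1, s.2.2.1, temp')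

def parseOptpivot (point_cloud : List (List Int)) (len_chunk_d : Int) (len_chunk_h : Int) : List (List (List Int)) × List (List (List Int)) :=
  let r := point_cloud.foldl (parseOptpivotStep len_chunk_d len_chunk_h) ([], [], "D", [])
  (r.1, r.2.1)

-- ===== PORT B =====
-- B's while-loop: slice whole chunks off the remaining list, alternating turn
def parseOptpivotAltGo (d h : Int) (rest : List (List Int)) (turn : Bool)
    (fd fh : List (List (List Int))) :
    List (List (List Int)) × List (List (List Int)) :=
  if hgo : (if turn then d else h) ≤ 0 ∨ (rest.length : Int) < (if turn then d else h) then
    (fd, fh)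
  else
    parseOptpivotAltGo d h (rest.drop (if turn then d else h).toNat) (!turn)
      (if turn then fd ++ [rest.take (if turn then d else h).toNat] else fd)
      (if turn then fh else fh ++ [rest.take (if turn then d else h).toNat])
termination_by rest.length
decreasing_by
  simp only [not_or, not_le, not_lt] at hgo
  simp only [List.length_drop]
  omega

def parseOptpivot_alt (point_cloud : List (List Int)) (len_chunk_d : Int) (len_chunk_h : Int) : List (List (List Int)) × List (List (List Int)) :=
  parseOptpivotAltGo len_chunk_d len_chunk_h point_cloud true [] []

-- ===== PRECONDITION & SPEC =====
def Spec_parseOptpivot (point_cloud : List (List Int)) (len_chunk_d : Int) (len_chunk_h : Int) (out : List (List (List Int)) × List (List (List Int))) : Prop := out = parseOptpivot_alt point_cloud len_chunk_d len_chunk_h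
instance (point_cloud : List (List Int)) (len_chunk_d : Int) (len_chunk_h : Int) (out : List (List (List Int)) × List (List (List Int))) : Decidable (Spec_parseOptpivot point_cloud len_chunk_d len_chunk_h out) := by unfold Spec_parseOptpivot; infer_instance

-- ===== CLAIM (what is proved, stated in full; the proofs are below) =====
def Claim_equal_parseOptpivot : Prop := ∀ (point_cloud : List (List Int)) (len_chunk_d : Int) (len_chunk_h : Int), Dom_parseOptpivot point_cloud len_chunk_d len_chunk_h → Spec_parseOptpivot point_cloud len_chunk_d len_chunk_h (parseOptpivot point_cloud len_chunk_d len_chunk_h)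

-- ===== LEMMAS AND PROOFS =====

-- the mode string of a turn
def pvCur (t : Bool) : String := if t then "D" else "H"

-- a step that does not complete a chunk just grows temp
theorem pv_step_keep (d h : Int) (t : Bool) (temp : List (List Int))
    (fd fh : List (List (List Int))) (p : List Int)
    (hne : ¬ ((temp.length : Int) + 1 = (if t then d else h))) :
    parseOptpivotStep d h (fd, fh, pvCur t, temp) p = (fd, fh, pvCur t, temp ++ [p]) := by
  cases t <;> simp_all [parseOptpivotStep, pvCur]

-- a step that completes the current chunk flushes it and flips the mode
theorem pv_step_flush (d h : Int) (t : Bool) (temp : List (List Int))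
    (fd fh : List (List (List Int))) (p : List Int)
    (heq : (temp.length : Int) + 1 = (if t then d else h)) :
    parseOptpivotStep d h (fd, fh, pvCur t, temp) p =
      ((if t then fd ++ [temp ++ [p]] else fd),
       (if t then fh else fh ++ [temp ++ [p]]),
       pvCur (!t), []) := by
  cases t <;> simp_all [parseOptpivotStep, pvCur]

-- A stalls: with a non-positive current chunk size the fold never flushes again
theorem pv_stall (d h : Int) (t : Bool) (hnp : (if t then d else h) ≤ 0) :
    ∀ (pts temp : List (List Int)) (fd fh : List (List (List Int))),
    List.foldl (parseOptpivotStep d h) (fd, fh, pvCur t, temp) pts =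
      (fd, fh, pvCur t, temp ++ pts) := by
  intro pts
  induction pts with
  | nil => intro temp fd fh; simp
  | cons p ps ih =>
    intro temp fd fh
    rw [List.foldl_cons, pv_step_keep d h t temp fd fh p (by omega), ih]
    simp

-- with a positive current size and a partially filled temp, either the input runs
-- out (nothing more flushed) or exactly the missing elements are absorbed,
-- flushed, and the mode flips
theorem pv_chunk (d h : Int) (t : Bool) :
    ∀ (pts temp : List (List Int)) (fd fh : List (List (List Int))),
    (temp.length : Int) < (if t then d else h) →
    List.foldl (parseOptpivotStep d h) (fd, fh, pvCur t, temp) pts =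
      (if ((temp.length : Int) + pts.length < (if t then d else h)) then
        (fd, fh, pvCur t, temp ++ pts)
      else
        List.foldl (parseOptpivotStep d h)
          ((if t then fd ++ [temp ++ pts.take ((if t then d else h) - temp.length).toNat] else fd),
           (if t then fh else fh ++ [temp ++ pts.take ((if t then d else h) - temp.length).toNat]),
           pvCur (!t), [])
          (pts.drop ((if t then d else h) - temp.length).toNat)) := by
  intro pts
  induction pts with
  | nil =>
    intro temp fd fh hlt
    rw [if_pos (by simpa using hlt)]
    simp
  | cons p ps ih =>
    intro temp fd fh hlt
    rw [List.foldl_cons]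
    by_cases hfull : ((temp.length : Int) + 1 = (if t then d else h))
    · rw [pv_step_flush d h t temp fd fh p hfull]
      have hc : ¬ ((temp.length : Int) + ((p :: ps).length : Int) < (if t then d else h)) := by
        simp only [List.length_cons]; push_cast; omega
      rw [if_neg hc]
      have h1 : ((if t then d else h) - (temp.length : Int)).toNat = 1 := by omega
      simp [h1]
    · rw [pv_step_keep d h t temp fd fh p hfull, ih (temp ++ [p]) fd fh (by simp; omega)]
      by_cases hrun : ((temp.length : Int) + ((p :: ps).length : Int) < (if t then d else h))
      · have hrun' : (((temp ++ [p]).length : Int) + (ps.length : Int) < (if t then d else h)) := by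
          simp at hrun ⊢; omega
        rw [if_pos hrun', if_pos hrun]
        simp
      · have hrun' : ¬ (((temp ++ [p]).length : Int) + (ps.length : Int) < (if t then d else h)) := by
          simp at hrun ⊢; omega
        rw [if_neg hrun', if_neg hrun]
        have hn : ((if t then d else h) - (temp.length : Int)).toNat =
            ((if t then d else h) - ((temp ++ [p]).length : Int)).toNat + 1 := by
          simp only [List.length_append, List.length_cons, List.length_nil]
          push_cast
          simp at hrun
          omega
        rw [hn]
        simp

-- main invariant: A's fold from an empty temp computes exactly B's loop
theorem pv_main (d h : Int) :
    ∀ (n : ℕ) (pts : List (List Int)), pts.length ≤ n →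
    ∀ (t : Bool) (fd fh : List (List (List Int))),
    ((List.foldl (parseOptpivotStep d h) (fd, fh, pvCur t, []) pts).1,
     (List.foldl (parseOptpivotStep d h) (fd, fh, pvCur t, []) pts).2.1) =
      parseOptpivotAltGo d h pts t fd fh := by
  intro n
  induction n with
  | zero =>
    intro pts hlen t fd fh
    have : pts = [] := List.length_eq_zero_iff.mp (Nat.le_zero.mp hlen)
    subst this
    rw [parseOptpivotAltGo, dif_pos (by simp; omega)]
    simp
  | succ n ih =>
    intro pts hlen t fd fh
    by_cases hnp : (if t then d else h) ≤ 0
    · rw [pv_stall d h t hnp pts [] fd fh,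
        parseOptpivotAltGo, dif_pos (Or.inl hnp)]
    · by_cases hshort : ((pts.length : Int) < (if t then d else h))
      · rw [pv_chunk d h t pts [] fd fh (by simpa using (by omega : (0:Int) < (if t then d else h))),
          if_pos (by simpa using hshort),
          parseOptpivotAltGo, dif_pos (Or.inr hshort)]
      · have hpos : (0 : Int) < (if t then d else h) := by omega
        rw [pv_chunk d h t pts [] fd fh (by simpa using hpos)]
        have hc : ¬ (((([] : List (List Int)).length : Int)) + ((pts.length : Int)) < (if t then d else h)) := by
          simpa using hshort
        rw [if_neg hc]
        simp only [List.length_nil, Nat.cast_zero, sub_zero, List.nil_append]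
        have hlen' : (pts.drop (if t then d else h).toNat).length ≤ n := by
          simp only [List.length_drop]; omega
        rw [ih _ hlen' (!t)]
        conv_rhs => rw [parseOptpivotAltGo]
        rw [dif_neg (fun hc => hc.elim hnp hshort)]

-- ===== VERDICT (by name: the statement is the Claim_ definition above) =====
theorem parseOptpivot_spec : Claim_equal_parseOptpivot := by
  intro pc d h _
  unfold Spec_parseOptpivot parseOptpivot parseOptpivot_alt
  exact pv_main d h pc.length pc le_rfl true [] []
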